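-- pv_equiv track=rewrite | github.com/koaeH/JMdict-sdcv | k/util/maya.py | reki
-- ===== SOURCE A (Python) =====
-- def reki(stax, i):
--     b = []
--     for init, is_reset, cantatio in reversed(stax):
--         if i > init:
--             if is_reset:
--                 break
--
--             b.append(cantatio)
--
--     b.reverse()
--
--     a = []
--     for e in b:
--         a.extend(e)
--
--     return a
-- ===== SOURCE B (Python) =====
-- def reki(stax, i):
--     a = []
--     for init, is_reset, cantatio in stax:
--         if i > init:
--             if is_reset:
--                 a = []
--             else:
--                 a.extend(cantatio)
--     return a
-- ===== Notes on version B (the rewrite author's own statement) =====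
-- stated objective: simpler
-- what changed: Replaced the reversed scan with break plus a reverse and a separate flatten loop by a single forward pass that extends one accumulator and clears it on a reset row.
import Mathlib
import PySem

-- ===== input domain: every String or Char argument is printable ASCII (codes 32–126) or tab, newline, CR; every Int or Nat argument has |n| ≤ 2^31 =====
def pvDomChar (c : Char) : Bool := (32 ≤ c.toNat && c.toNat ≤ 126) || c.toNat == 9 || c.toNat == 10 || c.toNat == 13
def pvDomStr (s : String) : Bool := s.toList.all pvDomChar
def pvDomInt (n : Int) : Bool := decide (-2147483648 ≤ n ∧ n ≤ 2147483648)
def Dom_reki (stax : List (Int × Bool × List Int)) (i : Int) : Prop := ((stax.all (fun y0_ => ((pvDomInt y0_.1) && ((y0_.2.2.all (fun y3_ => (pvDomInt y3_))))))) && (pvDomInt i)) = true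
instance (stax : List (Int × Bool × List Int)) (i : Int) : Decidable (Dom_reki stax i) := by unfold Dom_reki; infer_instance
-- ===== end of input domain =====

-- B replaces A's reversed scan with break + reverse + flatten loop by a single forward
-- pass that clears the accumulator on a reset row (objective: simpler).


-- ===== PORT A =====
-- the `for … in reversed(stax)` loop with `break`: builds b in processing order
def rekiCollect (i : Int) : List (Int × Bool × List Int) → List (List Int)
  | [] => []
  | (init, r, c) :: t =>
    if i > init then (if r then [] else c :: rekiCollect i t) else rekiCollect i t

def reki (stax : List (Int × Bool × List Int)) (i : Int) : List Int :=
  -- b.reverse(); then the `for e in b: a.extend(e)` loop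
  ((rekiCollect i stax.reverse).reverse).foldl (fun a e => a ++ e) []

-- ===== PORT B =====
def reki_alt (stax : List (Int × Bool × List Int)) (i : Int) : List Int :=
  stax.foldl (fun a p => if i > p.1 then (if p.2.1 then [] else a ++ p.2.2) else a) []

-- ===== PRECONDITION & SPEC =====
def Spec_reki (stax : List (Int × Bool × List Int)) (i : Int) (out : List Int) : Prop := out = reki_alt stax i
instance (stax : List (Int × Bool × List Int)) (i : Int) (out : List Int) : Decidable (Spec_reki stax i out) := by unfold Spec_reki; infer_instance

-- ===== CLAIM (what is proved, stated in full; the proofs are below) =====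
def Claim_equal_reki : Prop := ∀ (stax : List (Int × Bool × List Int)) (i : Int), Dom_reki stax i → Spec_reki stax i (reki stax i)

-- ===== LEMMAS AND PROOFS =====

-- the flattened value A produces from a (reversed) row list
def flatA (i : Int) : List (Int × Bool × List Int) → List Int
  | [] => []
  | (init, r, c) :: t =>
    if i > init then (if r then [] else flatA i t ++ c) else flatA i t

-- whether some row triggers the reset branch
def hitA (i : Int) (xs : List (Int × Bool × List Int)) : Bool :=
  xs.any (fun p => decide (i > p.1) && p.2.1)

theorem reki_eq_flatA (i : Int) (l : List (Int × Bool × List Int)) (acc : List Int) :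
    ((rekiCollect i l).reverse).foldl (fun a e => a ++ e) acc = acc ++ flatA i l := by
  induction l generalizing acc with
  | nil => simp [rekiCollect, flatA]
  | cons x t ih =>
    obtain ⟨init, r, c⟩ := x
    by_cases h : i > init
    · by_cases hr : r
      · simp [rekiCollect, flatA, h, hr]
      · simp [rekiCollect, flatA, h, hr, List.foldl_append, ih]
    · simp [rekiCollect, flatA, h, ih]

theorem alt_eq_flatA (i : Int) (xs : List (Int × Bool × List Int)) :
    ∀ acc : List Int,
      xs.foldl (fun a p => if i > p.1 then (if p.2.1 then [] else a ++ p.2.2) else a) acc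
        = if hitA i xs then flatA i xs.reverse else acc ++ flatA i xs.reverse := by
  induction xs using List.reverseRecOn with
  | nil => intro acc; simp [hitA, flatA]
  | append_singleton xs x ih =>
    intro acc
    obtain ⟨init, r, c⟩ := x
    rw [List.foldl_append]
    simp only [List.foldl_cons, List.foldl_nil]
    by_cases h : i > init
    · by_cases hr : r = true
      · have hhit : hitA i (xs ++ [(init, r, c)]) = true := by simp [hitA, h, hr]
        have hflat : flatA i ((xs ++ [(init, r, c)]).reverse) = [] := by
          simp [flatA, h, hr]
        rw [if_pos h, if_pos hr, hhit, hflat]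
        simp
      · have hhit : hitA i (xs ++ [(init, r, c)]) = hitA i xs := by simp [hitA, hr]
        have hflat : flatA i ((xs ++ [(init, r, c)]).reverse) = flatA i xs.reverse ++ c := by
          simp [flatA, h, hr]
        rw [if_pos h, if_neg hr, ih acc, hhit, hflat]
        split <;> simp
    · have hhit : hitA i (xs ++ [(init, r, c)]) = hitA i xs := by simp [hitA, h]
      have hflat : flatA i ((xs ++ [(init, r, c)]).reverse) = flatA i xs.reverse := by
        simp [flatA, h]
      rw [if_neg h, ih acc, hhit, hflat]

-- ===== VERDICT (by name: the statement is the Claim_ definition above) =====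
theorem reki_spec : Claim_equal_reki := by
  intro stax i _
  unfold Spec_reki reki reki_alt
  rw [reki_eq_flatA, alt_eq_flatA]
  split <;> simp
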